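-- pv_equiv track=rewrite | github.com/SrOscuroBlck/SongControlUSB | Functions/OrdrdBandYear.py | orderByBandYear
-- ===== SOURCE A (Python) =====
-- def cocktailBubbleSort(songs, pos) :
--     i = 0
--     notFinished = True
--
--     while (i < (len(songs)-1) and notFinished) :
--         notFinished = False
--         for j in range(len(songs) - 1 - i) :
--             if (songs[j][0]> songs[j+1][0]) :
--                 notFinished = True
--                 songs[j], songs[j+1] = songs[j+1], songs[j]
--         i += 1
--
--     return songs
--
-- def SearchArtistSongs(songs, artist) :
--     artistList = []
--     for i in range(len(songs)) :
--         if (songs[i][1] == artist) :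
--             artistList.append(songs[i])
--
--     return artistList
--
-- def orderByBandYear(songs) :
--     artists = []
--     orderedSongs = []
--     for i in range(len(songs)) :
--         if (songs[i][1] not in artists) :
--             artists.append(songs[i][1])
--
--     artists.sort()
--
--     for i in range(len(artists)) :
--         artistSongs = cocktailBubbleSort(SearchArtistSongs(songs, artists[i]), 3)
--         for j in range(len(artistSongs)) :
--             orderedSongs.append(artistSongs[j])
--
--     return orderedSongs
-- ===== SOURCE B (Python) =====
-- def orderByBandYear(songs):
--     # Two stable sorts: secondary key first (field 0), then primary key (artist = field 1).
--     byField = sorted(songs, key=lambda s: s[0])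
--     return sorted(byField, key=lambda s: s[1])
-- ===== Notes on version B (the rewrite author's own statement) =====
-- stated objective: alternative
-- what changed: A collects distinct artists, sorts them, and for each artist rescans the whole list and cocktail-bubble-sorts the group; B is two stable built-in sorts of the whole list (by field 0, then by artist), relying on sort stability to give the same grouping and in-group order.
import Mathlib
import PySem

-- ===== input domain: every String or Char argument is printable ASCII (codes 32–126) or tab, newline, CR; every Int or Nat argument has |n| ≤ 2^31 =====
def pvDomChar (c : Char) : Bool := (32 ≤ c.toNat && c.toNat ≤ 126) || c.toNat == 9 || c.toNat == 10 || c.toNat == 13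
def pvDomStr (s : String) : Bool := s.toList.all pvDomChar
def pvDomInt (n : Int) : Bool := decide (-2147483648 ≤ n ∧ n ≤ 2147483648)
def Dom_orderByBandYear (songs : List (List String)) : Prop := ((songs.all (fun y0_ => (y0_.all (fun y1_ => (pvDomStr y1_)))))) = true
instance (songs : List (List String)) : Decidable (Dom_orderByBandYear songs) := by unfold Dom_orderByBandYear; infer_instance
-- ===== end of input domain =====

-- B replaces A's group-by-artist + per-group cocktail bubble sort with two stable whole-list sorts (by field 0, then by artist): a different algorithm with the same output.

-- ===== PORT A =====
-- inner 'for j in range(...)' of cocktailBubbleSort: k adjacent comparisons from the head; returns (list, notFinished)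
def bubPass : Nat → List (List String) → List (List String) × Bool
  | 0, xs => (xs, false)
  | _ + 1, [] => ([], false)
  | _ + 1, [x] => ([x], false)
  | k + 1, x :: y :: rest =>
      if y.getD 0 "" < x.getD 0 "" then          -- songs[j][0] > songs[j+1][0] : swap
        let r := bubPass k (x :: rest)
        (y :: r.1, true)
      else
        let r := bubPass k (y :: rest)
        (x :: r.1, r.2)

-- the 'while (i < len-1 and notFinished)' loop; fuel = len - 1 - i = number of comparisons this pass
def cbsLoop : Nat → List (List String) → List (List String)
  | 0, xs => xs
  | f + 1, xs =>
      let r := bubPass (f + 1) xs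
      if r.2 then cbsLoop f r.1 else r.1

def cocktailBubbleSort (songs : List (List String)) (_pos : Int) : List (List String) :=
  cbsLoop (songs.length - 1) songs

def searchArtistSongs (songs : List (List String)) (artist : String) : List (List String) :=
  songs.foldl (fun acc s => if s.getD 1 "" == artist then acc ++ [s] else acc) []

def orderByBandYear (songs : List (List String)) : List (List String) :=
  let artists := songs.foldl (fun acc s => if acc.contains (s.getD 1 "") then acc else acc ++ [s.getD 1 ""]) []
  let artistsSorted := PySem.List.sorted artists (fun x => x) false
  artistsSorted.foldl (fun acc a => acc ++ cocktailBubbleSort (searchArtistSongs songs a) 3) []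

-- ===== PORT B =====
def orderByBandYear_alt (songs : List (List String)) : List (List String) :=
  PySem.List.sorted (PySem.List.sorted songs (fun s => s.getD 0 "") false) (fun s => s.getD 1 "") false

-- ===== PRECONDITION & SPEC =====
-- Pre_ excludes songs with fewer than 2 fields: there Python A raises IndexError on songs[i][1] / [0].
def Pre_orderByBandYear (songs : List (List String)) : Prop := ∀ s ∈ songs, 2 ≤ s.length
instance (songs : List (List String)) : Decidable (Pre_orderByBandYear songs) := by unfold Pre_orderByBandYear; infer_instance
def pvWitness_orderByBandYear : List (List String) :=
  [["1999", "Prince"], ["Hey Jude", "Beatles"], ["Purple Rain", "Prince"]]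

def Spec_orderByBandYear (songs : List (List String)) (out : List (List String)) : Prop := out = orderByBandYear_alt songs
instance (songs : List (List String)) (out : List (List String)) : Decidable (Spec_orderByBandYear songs out) := by unfold Spec_orderByBandYear; infer_instance

-- ===== CLAIM (what is proved, stated in full; the proofs are below) =====
def Claim_equal_orderByBandYear : Prop := ∀ (songs : List (List String)), Dom_orderByBandYear songs → Pre_orderByBandYear songs → Spec_orderByBandYear songs (orderByBandYear songs)

-- ===== LEMMAS AND PROOFS =====

-- keys used throughout the proof
def pk0 (s : List String) : String := s.getD 0 ""
def pk1 (s : List String) : String := s.getD 1 ""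

-- a key-sorted list is determined by its per-key filters (uniqueness of the stable order)
theorem stable_unique {α κ : Type} [LinearOrder κ] (key : α → κ) :
    ∀ (l1 l2 : List α), l1.Pairwise (fun a b => key a ≤ key b) → l2.Pairwise (fun a b => key a ≤ key b) →
      (∀ v : κ, l1.filter (fun x => decide (key x = v)) = l2.filter (fun x => decide (key x = v))) →
      l1 = l2 := by
  intro l1
  induction l1 with
  | nil =>
    intro l2 _ _ hf
    cases l2 with
    | nil => rfl
    | cons y t2 =>
      have := hf (key y)
      simp at this
  | cons x t1 ih =>
    intro l2 h1 h2 hf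
    cases l2 with
    | nil =>
      have := hf (key x)
      simp at this
    | cons y t2 =>
      have hmem1 : ∀ v : κ, (∃ z ∈ y :: t2, key z = v) → key x ≤ v := by
        intro v ⟨z, hz, hzv⟩
        have hne : (y :: t2).filter (fun x => decide (key x = v)) ≠ [] := by
          intro h
          rw [List.filter_eq_nil_iff] at h
          exact absurd (by simpa using hzv) (by simpa using h z hz)
        rw [← hf v] at hne
        rw [Ne, List.filter_eq_nil_iff] at hne
        push_neg at hne
        obtain ⟨w, hw, hwv⟩ := hne
        have hwv' : key w = v := by simpa using hwv
        rcases List.mem_cons.mp hw with h | h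
        · exact h ▸ hwv' ▸ le_refl _
        · exact hwv' ▸ (List.pairwise_cons.mp h1).1 w h
      have hmem2 : ∀ v : κ, (∃ z ∈ x :: t1, key z = v) → key y ≤ v := by
        intro v ⟨z, hz, hzv⟩
        have hne : (x :: t1).filter (fun x => decide (key x = v)) ≠ [] := by
          intro h
          rw [List.filter_eq_nil_iff] at h
          exact absurd (by simpa using hzv) (by simpa using h z hz)
        rw [hf v] at hne
        rw [Ne, List.filter_eq_nil_iff] at hne
        push_neg at hne
        obtain ⟨w, hw, hwv⟩ := hne
        have hwv' : key w = v := by simpa using hwv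
        rcases List.mem_cons.mp hw with h | h
        · exact h ▸ hwv' ▸ le_refl _
        · exact hwv' ▸ (List.pairwise_cons.mp h2).1 w h
      have hxy : key x = key y :=
        le_antisymm (hmem1 (key y) ⟨y, List.mem_cons_self, rfl⟩)
                    (hmem2 (key x) ⟨x, List.mem_cons_self, rfl⟩)
      have hx := hf (key x)
      simp [hxy] at hx
      obtain ⟨hxy', htf⟩ := hx
      subst hxy'
      have : t1 = t2 := by
        apply ih t2 (List.pairwise_cons.mp h1).2 (List.pairwise_cons.mp h2).2
        intro v
        by_cases hv : v = key x
        · subst hv; exact htf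
        · have := hf v
          simpa [Ne.symm hv, hxy ▸ (Ne.symm hv)] using this
      rw [this]

theorem insertBy_forall_before {α : Type} (bef : α → α → Bool) (x : α) (zs : List α)
    (h : ∀ z ∈ zs, bef x z = true) : PySem.List.insertBy bef x zs = x :: zs := by
  cases zs with
  | nil => simp [PySem.List.insertBy]
  | cons z t => simp [PySem.List.insertBy, h z List.mem_cons_self]

theorem pairwise_insertBy {α κ : Type} [LinearOrder κ] (key : α → κ) (x : α) (ys : List α)
    (h : ys.Pairwise (fun a b => key a ≤ key b)) :
    (PySem.List.insertBy (fun a b => decide (key a < key b)) x ys).Pairwise (fun a b => key a ≤ key b) := by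
  induction ys with
  | nil => simp [PySem.List.insertBy]
  | cons y t ih =>
    rw [List.pairwise_cons] at h
    by_cases hxy : key x < key y
    · rw [show PySem.List.insertBy (fun a b => decide (key a < key b)) x (y :: t) = x :: y :: t by
        simp [PySem.List.insertBy, hxy]]
      refine List.pairwise_cons.mpr ⟨?_, List.pairwise_cons.mpr h⟩
      intro z hz
      rcases List.mem_cons.mp hz with rfl | hz
      · exact le_of_lt hxy
      · exact le_trans (le_of_lt hxy) (h.1 z hz)
    · rw [show PySem.List.insertBy (fun a b => decide (key a < key b)) x (y :: t)
            = y :: PySem.List.insertBy (fun a b => decide (key a < key b)) x t by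
        simp [PySem.List.insertBy, hxy]]
      refine List.pairwise_cons.mpr ⟨?_, ih h.2⟩
      intro z hz
      rcases (PySem.List.mem_insertBy _ _ _ _).mp hz with rfl | hz
      · exact le_of_not_gt hxy
      · exact h.1 z hz

theorem filter_insertBy_sorted {α κ : Type} [LinearOrder κ] (key : α → κ) (p : α → Bool) (x : α) :
    ∀ ys : List α, ys.Pairwise (fun a b => key a ≤ key b) →
      (PySem.List.insertBy (fun a b => decide (key a < key b)) x ys).filter p =
        if p x then PySem.List.insertBy (fun a b => decide (key a < key b)) x (ys.filter p) else ys.filter p := by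
  intro ys
  induction ys with
  | nil =>
    intro _
    by_cases hp : p x <;> simp [PySem.List.insertBy, hp]
  | cons y t ih =>
    intro h
    rw [List.pairwise_cons] at h
    by_cases hxy : key x < key y
    · rw [show PySem.List.insertBy (fun a b => decide (key a < key b)) x (y :: t) = x :: y :: t by
        simp [PySem.List.insertBy, hxy]]
      by_cases hp : p x
      · have hall : ∀ z ∈ (y :: t).filter p, decide (key x < key z) = true := by
          intro z hz
          have hz' := (List.mem_filter.mp hz).1
          rcases List.mem_cons.mp hz' with rfl | hz'
          · simpa using hxy
          · simpa using lt_of_lt_of_le hxy (h.1 z hz')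
        rw [insertBy_forall_before _ _ _ hall]
        simp [hp]
      · simp [hp, List.filter_cons]
    · rw [show PySem.List.insertBy (fun a b => decide (key a < key b)) x (y :: t)
            = y :: PySem.List.insertBy (fun a b => decide (key a < key b)) x t by
        simp [PySem.List.insertBy, hxy]]
      by_cases hpy : p y
      · by_cases hp : p x
        · rw [List.filter_cons_of_pos hpy, ih h.2]
          rw [List.filter_cons_of_pos hpy]
          simp only [hp, if_true]
          rw [show PySem.List.insertBy (fun a b => decide (key a < key b)) x (y :: t.filter p)
                = y :: PySem.List.insertBy (fun a b => decide (key a < key b)) x (t.filter p) by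
            simp [PySem.List.insertBy, hxy]]
        · rw [List.filter_cons_of_pos hpy, ih h.2]
          simp [hp, List.filter_cons_of_pos hpy]
      · rw [List.filter_cons_of_neg hpy, ih h.2]
        rw [List.filter_cons_of_neg hpy]

theorem filter_sorted_aux {α κ : Type} [LinearOrder κ] (key : α → κ) (p : α → Bool) :
    ∀ (xs acc : List α), acc.Pairwise (fun a b => key a ≤ key b) →
      (xs.foldl (fun acc x => PySem.List.insertBy (fun a b => decide (key a < key b)) x acc) acc).filter p =
        (xs.filter p).foldl (fun acc x => PySem.List.insertBy (fun a b => decide (key a < key b)) x acc) (acc.filter p) := by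
  intro xs
  induction xs with
  | nil => intro acc _; rfl
  | cons x t ih =>
    intro acc hacc
    rw [List.foldl_cons, ih _ (pairwise_insertBy key x acc hacc),
        filter_insertBy_sorted key p x acc hacc]
    by_cases hp : p x
    · simp [hp, List.filter_cons_of_pos]
    · simp [hp, List.filter_cons_of_neg]

theorem filter_sorted {α κ : Type} [LinearOrder κ] (key : α → κ) (p : α → Bool) (xs : List α) :
    (PySem.List.sorted xs key).filter p = PySem.List.sorted (xs.filter p) key := by
  rw [PySem.List.sorted_eq_foldl_insertBy, PySem.List.sorted_eq_foldl_insertBy]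
  simpa using filter_sorted_aux key p xs [] (List.Pairwise.nil)

theorem bp_perm (k : Nat) : ∀ (xs : List (List String)), (bubPass k xs).1.Perm xs := by
  induction k with
  | zero => intro xs; simp [bubPass]
  | succ k ih =>
    intro xs
    match xs with
    | [] => simp [bubPass]
    | [x] => simp [bubPass]
    | x :: y :: rest =>
      by_cases h : y.getD 0 "" < x.getD 0 ""
      · simp only [bubPass, h, if_pos]
        exact ((ih (x :: rest)).cons y).trans (List.Perm.swap x y rest)
      · simp only [bubPass, h, if_false]
        exact (ih (y :: rest)).cons x

theorem bp_drop (k : Nat) : ∀ (xs : List (List String)), (bubPass k xs).1.drop (k+1) = xs.drop (k+1) := by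
  induction k with
  | zero => intro xs; simp [bubPass]
  | succ k ih =>
    intro xs
    match xs with
    | [] => simp [bubPass]
    | [x] => simp [bubPass]
    | x :: y :: rest =>
      by_cases h : y.getD 0 "" < x.getD 0 ""
      · simp only [bubPass, h, if_pos]
        simpa [List.drop_succ_cons] using ih (x :: rest)
      · simp only [bubPass, h, if_false]
        simpa [List.drop_succ_cons] using ih (y :: rest)

theorem bp_filter (k : Nat) : ∀ (xs : List (List String)) (v : String),
    (bubPass k xs).1.filter (fun s => decide (pk0 s = v)) = xs.filter (fun s => decide (pk0 s = v)) := by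
  induction k with
  | zero => intro xs v; simp [bubPass]
  | succ k ih =>
    intro xs v
    match xs with
    | [] => simp [bubPass]
    | [x] => simp [bubPass]
    | x :: y :: rest =>
      by_cases h : y.getD 0 "" < x.getD 0 ""
      · simp only [bubPass, h, if_pos]
        have h' : pk0 y < pk0 x := h
        by_cases hy : pk0 y = v
        · have hx : ¬ pk0 x = v := by
            intro hx; rw [hx, hy] at h'; exact lt_irrefl v h'
          rw [List.filter_cons, ih (x :: rest) v, List.filter_cons, List.filter_cons,
              List.filter_cons]
          simp [hy, hx]
        · rw [List.filter_cons, ih (x :: rest) v, List.filter_cons, List.filter_cons,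
              List.filter_cons]
          simp [hy]
      · simp only [bubPass, h, if_false]
        rw [List.filter_cons, ih (y :: rest) v, List.filter_cons (x := x) (xs := y :: rest)]

theorem bp_snd_false (k : Nat) : ∀ (xs : List (List String)), (bubPass k xs).2 = false →
    (bubPass k xs).1 = xs := by
  induction k with
  | zero => intro xs _; simp [bubPass]
  | succ k ih =>
    intro xs hf
    match xs with
    | [] => simp [bubPass]
    | [x] => simp [bubPass]
    | x :: y :: rest =>
      by_cases h : y.getD 0 "" < x.getD 0 ""
      · simp only [bubPass, h, if_pos] at hf
        exact absurd hf (by decide)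
      · simp only [bubPass, h, if_false] at hf ⊢
        rw [ih (y :: rest) hf]

theorem sorted_of_inv0 (xs : List (List String))
    (h1 : (xs.drop 1).Pairwise (fun a b => pk0 a ≤ pk0 b))
    (h2 : ∀ a ∈ xs.take 1, ∀ b ∈ xs.drop 1, pk0 a ≤ pk0 b) :
    xs.Pairwise (fun a b => pk0 a ≤ pk0 b) := by
  cases xs with
  | nil => exact List.Pairwise.nil
  | cons x t =>
    simp only [List.drop_succ_cons, List.drop_zero, List.take_succ_cons, List.take_zero] at h1 h2
    exact List.pairwise_cons.mpr ⟨fun b hb => h2 x (by simp) b hb, h1⟩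

theorem bp_sorted_of_false (k : Nat) : ∀ (xs : List (List String)),
    (xs.drop (k+1)).Pairwise (fun a b => pk0 a ≤ pk0 b) →
    (∀ a ∈ xs.take (k+1), ∀ b ∈ xs.drop (k+1), pk0 a ≤ pk0 b) →
    (bubPass k xs).2 = false →
    xs.Pairwise (fun a b => pk0 a ≤ pk0 b) := by
  induction k with
  | zero => intro xs h1 h2 _; exact sorted_of_inv0 xs h1 h2
  | succ k ih =>
    intro xs h1 h2 hf
    match xs with
    | [] => exact List.Pairwise.nil
    | [x] => simp
    | x :: y :: rest =>
      by_cases h : y.getD 0 "" < x.getD 0 ""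
      · simp only [bubPass, h, if_pos] at hf
        exact absurd hf (by decide)
      · simp only [bubPass, h, if_false] at hf
        have hxy : pk0 x ≤ pk0 y := le_of_not_gt h
        have h1' : ((y :: rest).drop (k+1)).Pairwise (fun a b => pk0 a ≤ pk0 b) := by
          simpa using h1
        have h2' : ∀ a ∈ (y :: rest).take (k+1), ∀ b ∈ (y :: rest).drop (k+1), pk0 a ≤ pk0 b := by
          intro a ha b hb
          apply h2 a _ b
          · simpa using hb
          · simp only [List.take_succ_cons] at ha ⊢
            exact List.mem_cons_of_mem x ha
        have htail := ih (y :: rest) h1' h2' hf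
        refine List.pairwise_cons.mpr ⟨?_, htail⟩
        intro b hb
        rcases List.mem_cons.mp hb with rfl | hb
        · exact hxy
        · exact le_trans hxy ((List.pairwise_cons.mp htail).1 b hb)

theorem bp_step (k : Nat) : ∀ (xs : List (List String)),
    (xs.drop (k+1)).Pairwise (fun a b => pk0 a ≤ pk0 b) →
    (∀ a ∈ xs.take (k+1), ∀ b ∈ xs.drop (k+1), pk0 a ≤ pk0 b) →
    ((bubPass k xs).1.drop k).Pairwise (fun a b => pk0 a ≤ pk0 b) ∧
      (∀ a ∈ xs.take (k+1), ∀ b ∈ (bubPass k xs).1.drop k, pk0 a ≤ pk0 b) := by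
  induction k with
  | zero =>
    intro xs h1 h2
    constructor
    · simpa [bubPass] using sorted_of_inv0 xs h1 h2
    · intro a ha b hb
      simp only [bubPass, List.drop_zero] at hb
      cases xs with
      | nil => simp at ha
      | cons x t =>
        simp only [List.take_succ_cons, List.take_zero] at ha
        have ha' : a = x := by simpa using ha
        subst ha'
        rcases List.mem_cons.mp hb with rfl | hb
        · exact le_refl _
        · exact h2 a (by simp) b (by simpa using hb)
  | succ k ih =>
    intro xs h1 h2
    match xs with
    | [] => refine ⟨by simp [bubPass], ?_⟩; intro a ha; simp at ha
    | [x] =>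
      refine ⟨?_, ?_⟩
      · simp [bubPass, List.drop_eq_nil_of_le]
      · intro a ha b hb
        simp only [bubPass] at hb
        simp only [List.drop_succ_cons, List.drop_nil] at hb
        simp at hb
    | x :: y :: rest =>
      by_cases h : y.getD 0 "" < x.getD 0 ""
      · -- swap branch
        have hyx : pk0 y < pk0 x := h
        have h1' : ((x :: rest).drop (k+1)).Pairwise (fun a b => pk0 a ≤ pk0 b) := by
          simpa using h1
        have h2' : ∀ a ∈ (x :: rest).take (k+1), ∀ b ∈ (x :: rest).drop (k+1), pk0 a ≤ pk0 b := by
          intro a ha b hb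
          apply h2 a _ b
          · simpa using hb
          · simp only [List.take_succ_cons] at ha ⊢
            rcases List.mem_cons.mp ha with rfl | ha
            · exact List.mem_cons_self
            · exact List.mem_cons_of_mem x (List.mem_cons_of_mem y ha)
        obtain ⟨c1, c2⟩ := ih (x :: rest) h1' h2'
        have hres : (bubPass (k+1) (x :: y :: rest)).1 = y :: (bubPass k (x :: rest)).1 := by
          simp only [bubPass, h, if_pos]
        constructor
        · rw [hres, List.drop_succ_cons]; exact c1
        · intro a ha b hb
          rw [hres, List.drop_succ_cons] at hb
          simp only [List.take_succ_cons] at ha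
          rcases List.mem_cons.mp ha with rfl | ha
          · exact c2 a (by simp [List.take_succ_cons]) b hb
          · rcases List.mem_cons.mp ha with rfl | ha
            · exact le_trans (le_of_lt hyx) (c2 x (by simp [List.take_succ_cons]) b hb)
            · exact c2 a (by simp only [List.take_succ_cons]; exact List.mem_cons_of_mem x ha) b hb
      · -- no-swap branch
        have hxy : pk0 x ≤ pk0 y := le_of_not_gt h
        have h1' : ((y :: rest).drop (k+1)).Pairwise (fun a b => pk0 a ≤ pk0 b) := by
          simpa using h1
        have h2' : ∀ a ∈ (y :: rest).take (k+1), ∀ b ∈ (y :: rest).drop (k+1), pk0 a ≤ pk0 b := by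
          intro a ha b hb
          apply h2 a _ b
          · simpa using hb
          · simp only [List.take_succ_cons] at ha ⊢
            exact List.mem_cons_of_mem x ha
        obtain ⟨c1, c2⟩ := ih (y :: rest) h1' h2'
        have hres : (bubPass (k+1) (x :: y :: rest)).1 = x :: (bubPass k (y :: rest)).1 := by
          simp only [bubPass, h, if_false]
        constructor
        · rw [hres, List.drop_succ_cons]; exact c1
        · intro a ha b hb
          rw [hres, List.drop_succ_cons] at hb
          simp only [List.take_succ_cons] at ha
          rcases List.mem_cons.mp ha with rfl | ha
          · exact le_trans hxy (c2 y (by simp [List.take_succ_cons]) b hb)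
          · exact c2 a (by simpa [List.take_succ_cons] using ha) b hb

theorem mem_take_of_perm_drop {α : Type} (l1 l2 : List α) (n : Nat) (hp : l1.Perm l2)
    (hd : l1.drop n = l2.drop n) (a : α) (ha : a ∈ l1.take n) : a ∈ l2.take n := by
  have h1 : l1.take n ++ l1.drop n = l1 := List.take_append_drop n l1
  have h2 : l2.take n ++ l2.drop n = l2 := List.take_append_drop n l2
  have hperm : (l1.take n ++ l1.drop n).Perm (l2.take n ++ l2.drop n) := by
    rw [h1, h2]; exact hp
  rw [hd] at hperm
  have := (List.perm_append_right_iff _).mp hperm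
  exact this.mem_iff.mp ha

theorem cbsLoop_sorted (f : Nat) : ∀ (xs : List (List String)),
    (xs.drop (f+1)).Pairwise (fun a b => pk0 a ≤ pk0 b) →
    (∀ a ∈ xs.take (f+1), ∀ b ∈ xs.drop (f+1), pk0 a ≤ pk0 b) →
    (cbsLoop f xs).Pairwise (fun a b => pk0 a ≤ pk0 b) := by
  induction f with
  | zero => intro xs h1 h2; exact sorted_of_inv0 xs h1 h2
  | succ f ih =>
    intro xs h1 h2
    simp only [cbsLoop]
    by_cases hb : (bubPass (f+1) xs).2
    · simp only [hb, if_true]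
      obtain ⟨c1, c2⟩ := bp_step (f+1) xs h1 h2
      apply ih
      · exact c1
      · intro a ha b hbmem
        apply c2 a _ b hbmem
        -- a ∈ r.take (f+1) → a ∈ r.take (f+2) → a ∈ xs.take (f+2)
        have ha2 : a ∈ (bubPass (f+1) xs).1.take (f+2) := by
          have : (bubPass (f+1) xs).1.take (f+1)
              = ((bubPass (f+1) xs).1.take (f+2)).take (f+1) := by
            rw [List.take_take]
            congr 1
            omega
          rw [this] at ha
          exact List.mem_of_mem_take ha
        exact mem_take_of_perm_drop _ xs (f+2) (bp_perm (f+1) xs) (bp_drop (f+1) xs) a ha2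
    · rw [Bool.not_eq_true] at hb
      simp only [hb, if_false]
      rw [bp_snd_false (f+1) xs hb]
      exact bp_sorted_of_false (f+1) xs h1 h2 hb

theorem cbsLoop_filter (f : Nat) : ∀ (xs : List (List String)) (v : String),
    (cbsLoop f xs).filter (fun s => decide (pk0 s = v)) = xs.filter (fun s => decide (pk0 s = v)) := by
  induction f with
  | zero => intro xs v; rfl
  | succ f ih =>
    intro xs v
    simp only [cbsLoop]
    by_cases hb : (bubPass (f+1) xs).2
    · simp only [hb, if_true]
      rw [ih, bp_filter]
    · rw [Bool.not_eq_true] at hb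
      simp only [hb, if_false]
      exact bp_filter (f+1) xs v

theorem cbsLoop_perm (f : Nat) : ∀ (xs : List (List String)), (cbsLoop f xs).Perm xs := by
  induction f with
  | zero => intro xs; rfl
  | succ f ih =>
    intro xs
    simp only [cbsLoop]
    by_cases hb : (bubPass (f+1) xs).2
    · simp only [hb, if_true]
      exact (ih _).trans (bp_perm (f+1) xs)
    · rw [Bool.not_eq_true] at hb
      simp only [hb, if_false]
      exact bp_perm (f+1) xs

theorem cbs_sorted (l : List (List String)) :
    (cocktailBubbleSort l 3).Pairwise (fun a b => pk0 a ≤ pk0 b) := by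
  unfold cocktailBubbleSort
  have hnil : l.drop (l.length - 1 + 1) = [] := List.drop_eq_nil_of_le (by omega)
  apply cbsLoop_sorted
  · rw [hnil]; exact List.Pairwise.nil
  · intro a _ b hb
    rw [hnil] at hb
    simp at hb

theorem cbs_eq_sorted (l : List (List String)) :
    cocktailBubbleSort l 3 = PySem.List.sorted l pk0 := by
  apply stable_unique pk0 _ _ (cbs_sorted l) (PySem.List.sorted_pairwise l pk0)
  intro v
  rw [show cocktailBubbleSort l 3 = cbsLoop (l.length - 1) l from rfl, cbsLoop_filter,
      filter_sorted pk0 (fun s => decide (pk0 s = v)) l]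
  have hpw : (l.filter (fun s => decide (pk0 s = v))).Pairwise (fun a b => pk0 a ≤ pk0 b) := by
    apply List.pairwise_of_forall_mem_list
    intro a ha b hb
    have ha' : pk0 a = v := by simpa using (List.mem_filter.mp ha).2
    have hb' : pk0 b = v := by simpa using (List.mem_filter.mp hb).2
    rw [ha', hb']
  rw [PySem.List.sorted_eq_self_of_pairwise _ _ hpw]

theorem artists_eq (songs : List (List String)) :
    songs.foldl (fun acc s => if acc.contains (s.getD 1 "") then acc else acc ++ [s.getD 1 ""]) [] =
      PySem.Set.ofList (songs.map pk1) := by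
  show _ = (songs.map pk1).foldl PySem.Set.add PySem.Set.empty
  rw [List.foldl_map]
  rfl

theorem search_eq_filter (songs : List (List String)) (a : String) :
    searchArtistSongs songs a = songs.filter (fun s => decide (pk1 s = a)) := by
  unfold searchArtistSongs
  rw [PySem.List.foldl_append_if_eq_filter, List.nil_append]
  apply List.filter_congr
  intro s _
  rw [Bool.eq_iff_iff]
  by_cases h : s.getD 1 "" = a
  · simp [pk1, h]
  · simp [pk1, h]

theorem orderByBandYear_eq_flatMap (songs : List (List String)) :
    orderByBandYear songs =
      (PySem.List.sorted (PySem.Set.ofList (songs.map pk1)) (fun x => x)).flatMap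
        (fun a => cocktailBubbleSort (songs.filter (fun s => decide (pk1 s = a))) 3) := by
  unfold orderByBandYear
  rw [artists_eq, PySem.List.foldl_append_eq_flatMap, List.nil_append]
  congr 1
  funext a
  rw [search_eq_filter]

theorem flatMap_pairwise (g : String → List (List String)) :
    ∀ (as : List String), as.Pairwise (· < ·) → (∀ a, ∀ x ∈ g a, pk1 x = a) →
      (as.flatMap g).Pairwise (fun a b => pk1 a ≤ pk1 b) := by
  intro as
  induction as with
  | nil => intro _ _; simp
  | cons a t ih =>
    intro hp hg
    rw [List.flatMap_cons]
    apply List.pairwise_append.mpr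
    refine ⟨?_, ih (List.pairwise_cons.mp hp).2 hg, ?_⟩
    · apply List.pairwise_of_forall_mem_list
      intro x hx y hy
      rw [hg a x hx, hg a y hy]
    · intro x hx y hy
      obtain ⟨b, hb, hyb⟩ := List.mem_flatMap.mp hy
      rw [hg a x hx, hg b y hyb]
      exact le_of_lt ((List.pairwise_cons.mp hp).1 b hb)

theorem filter_flatMap_eq (g : String → List (List String)) :
    ∀ (as : List String), as.Pairwise (· < ·) → (∀ a, ∀ x ∈ g a, pk1 x = a) → ∀ v : String,
      (as.flatMap g).filter (fun x => decide (pk1 x = v)) = if v ∈ as then g v else [] := by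
  intro as
  induction as with
  | nil => intro _ _ v; simp
  | cons a t ih =>
    intro hp hg v
    rw [List.flatMap_cons, List.filter_append, ih (List.pairwise_cons.mp hp).2 hg v]
    by_cases hv : v = a
    · subst hv
      have hvt : v ∉ t := fun hmem => lt_irrefl v ((List.pairwise_cons.mp hp).1 v hmem)
      have hself : (g v).filter (fun x => decide (pk1 x = v)) = g v := by
        apply List.filter_eq_self.mpr
        intro x hx
        simp [hg v x hx]
      simp [hself, hvt]
    · have hnilf : (g a).filter (fun x => decide (pk1 x = v)) = [] := by
        apply List.filter_eq_nil_iff.mpr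
        intro x hx
        rw [hg a x hx]
        simp only [decide_eq_true_eq]
        exact fun h => hv h.symm
      simp [hnilf, hv]

theorem main_eq (songs : List (List String)) : orderByBandYear songs = orderByBandYear_alt songs := by
  have hgmem : ∀ a : String, ∀ x ∈ cocktailBubbleSort (songs.filter (fun s => decide (pk1 s = a))) 3,
      pk1 x = a := by
    intro a x hx
    have hx' : x ∈ songs.filter (fun s => decide (pk1 s = a)) :=
      ((cbsLoop_perm _ _).mem_iff).mp hx
    simpa using (List.mem_filter.mp hx').2
  have hAs : (PySem.List.sorted (PySem.Set.ofList (songs.map pk1)) (fun x => x)).Pairwise (· < ·) :=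
    PySem.List.sorted_ofList_pairwise_lt (songs.map pk1)
  rw [orderByBandYear_eq_flatMap]
  apply stable_unique pk1
  · exact flatMap_pairwise _ _ hAs hgmem
  · exact PySem.List.sorted_pairwise _ _
  · intro v
    rw [filter_flatMap_eq _ _ hAs hgmem v]
    unfold orderByBandYear_alt
    rw [filter_sorted (fun s => s.getD 1 "") (fun x => decide (pk1 x = v))]
    have hall : ((PySem.List.sorted songs (fun s => s.getD 0 "")).filter
        (fun x => decide (pk1 x = v))).Pairwise
          (fun a b => (fun s => s.getD 1 "") a ≤ (fun s => s.getD 1 "") b) := by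
      apply List.pairwise_of_forall_mem_list
      intro a ha b hb
      have ha' : pk1 a = v := by simpa using (List.mem_filter.mp ha).2
      have hb' : pk1 b = v := by simpa using (List.mem_filter.mp hb).2
      show pk1 a ≤ pk1 b
      rw [ha', hb']
    rw [PySem.List.sorted_eq_self_of_pairwise _ _ hall,
        filter_sorted (fun s => s.getD 0 "") (fun x => decide (pk1 x = v))]
    by_cases hv : v ∈ PySem.List.sorted (PySem.Set.ofList (songs.map pk1)) (fun x => x)
    · rw [if_pos hv, cbs_eq_sorted]
      rfl
    · rw [if_neg hv]
      have hvm : v ∉ songs.map pk1 := by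
        intro hm
        exact hv ((PySem.List.mem_sorted _ _ _ _).mpr ((PySem.Set.mem_ofList _ _).mpr hm))
      have hfe : songs.filter (fun x => decide (pk1 x = v)) = [] := by
        apply List.filter_eq_nil_iff.mpr
        intro x hx hdx
        have hpx : pk1 x = v := by simpa using hdx
        exact hvm (hpx ▸ List.mem_map_of_mem hx)
      rw [hfe]
      rfl

-- ===== VERDICT (by name: the statement is the Claim_ definition above) =====
theorem orderByBandYear_spec : Claim_equal_orderByBandYear := by
  intro songs _ _
  exact main_eq songs
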